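-- pv_equiv track=rewrite | github.com/pavel-vlasov/TUI-K6-Runner | k6/backends/embedded.py | _split_stream_buffer
-- ===== SOURCE A (Python) =====
-- def _split_stream_buffer(
--     buffer: str, pending_progress_flag: bool = False
-- ) -> tuple[list[tuple[str, bool]], str, bool]:
--     lines: list[tuple[str, bool]] = []
--     start = 0
--     segment_is_progress = pending_progress_flag
--
--     for index, char in enumerate(buffer):
--         if char not in {"\n", "\r"}:
--             continue
--
--         segment = buffer[start:index]
--         lines.append((segment, segment_is_progress or char == "\r"))
--         segment_is_progress = char == "\r"
--         start = index + 1
--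
--     return lines, buffer[start:], segment_is_progress
-- ===== SOURCE B (Python) =====
-- def _split_stream_buffer(
--     buffer: str, pending_progress_flag: bool = False
-- ) -> tuple[list[tuple[str, bool]], str, bool]:
--     # Normalize both delimiters to '\n', split once with the library,
--     # and recover each delimiter's kind from a filtered pass over the buffer.
--     segments = buffer.replace("\r", "\n").split("\n")
--     delimiter_is_cr = [c == "\r" for c in buffer if c in "\n\r"]
--     lines: list[tuple[str, bool]] = []
--     flag = pending_progress_flag
--     for segment, is_cr in zip(segments, delimiter_is_cr):
--         lines.append((segment, flag or is_cr))
--         flag = is_cr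
--     return lines, segments[-1], flag
-- ===== Notes on version B (the rewrite author's own statement) =====
-- stated objective: alternative
-- what changed: A scans with enumerate, index bookkeeping and slicing; B normalizes carriage returns to newlines, splits once with str.split, recovers each delimiter's kind by a filtered pass, and zips the flags back onto the segments.
import Mathlib
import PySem

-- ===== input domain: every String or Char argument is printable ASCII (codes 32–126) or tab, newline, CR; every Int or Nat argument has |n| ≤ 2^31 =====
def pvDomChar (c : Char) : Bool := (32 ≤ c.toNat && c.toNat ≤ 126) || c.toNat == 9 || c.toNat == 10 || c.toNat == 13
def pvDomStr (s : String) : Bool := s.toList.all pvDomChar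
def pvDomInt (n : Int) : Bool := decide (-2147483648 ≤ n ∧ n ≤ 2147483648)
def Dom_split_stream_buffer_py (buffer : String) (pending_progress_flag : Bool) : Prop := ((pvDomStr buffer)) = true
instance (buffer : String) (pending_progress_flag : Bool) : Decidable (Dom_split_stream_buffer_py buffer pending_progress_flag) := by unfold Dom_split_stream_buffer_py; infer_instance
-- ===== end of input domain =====

-- B replaces A's index/slice scan by a library decomposition: normalize carriage returns to newlines, split once,
-- and recover each delimiter's kind by a filtered pass; objective: alternative (same linear cost).

-- ===== PORT A =====
def split_stream_buffer_py (buffer : String) (pending_progress_flag : Bool) : (List (String × Bool)) × String × Bool :=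
  let st := (PySem.List.enumerate buffer.toList 0).foldl
    (fun (st : (List (String × Bool)) × Int × Bool) ic =>
      if !(ic.2 == '\n' || ic.2 == '\r') then st
      else
        let segment := PySem.Str.slice buffer (some st.2.1) (some ic.1)
        (st.1 ++ [(segment, st.2.2 || (ic.2 == '\r'))], ic.1 + 1, ic.2 == '\r'))
    ([], 0, pending_progress_flag)
  (st.1, PySem.Str.slice buffer (some st.2.1) none, st.2.2)

-- ===== PORT B =====
-- segments[-1] is ported as getLast?.getD "" (str.split never returns an empty list).
def split_stream_buffer_py_alt (buffer : String) (pending_progress_flag : Bool) : (List (String × Bool)) × String × Bool :=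
  let segments := (PySem.Str.split? (PySem.Str.replace buffer "\r" "\n") "\n").getD []
  let delimIsCr := (buffer.toList.filter (fun c => c == '\n' || c == '\r')).map (fun c => c == '\r')
  let st := (segments.zip delimIsCr).foldl
    (fun (st : (List (String × Bool)) × Bool) p => (st.1 ++ [(p.1, st.2 || p.2)], p.2))
    ([], pending_progress_flag)
  (st.1, (segments.getLast?).getD "", st.2)

-- ===== PRECONDITION & SPEC =====
def Spec_split_stream_buffer_py (buffer : String) (pending_progress_flag : Bool) (out : (List (String × Bool)) × String × Bool) : Prop := out = split_stream_buffer_py_alt buffer pending_progress_flag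
instance (buffer : String) (pending_progress_flag : Bool) (out : (List (String × Bool)) × String × Bool) : Decidable (Spec_split_stream_buffer_py buffer pending_progress_flag out) := by unfold Spec_split_stream_buffer_py; infer_instance

-- ===== CLAIM (what is proved, stated in full; the proofs are below) =====
def Claim_equal_split_stream_buffer_py : Prop := ∀ (buffer : String) (pending_progress_flag : Bool), Dom_split_stream_buffer_py buffer pending_progress_flag → Spec_split_stream_buffer_py buffer pending_progress_flag (split_stream_buffer_py buffer pending_progress_flag)

-- ===== LEMMAS AND PROOFS =====

def pvIsDelim (c : Char) : Bool := c == '\n' || c == '\r'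

def pvNorm (c : Char) : Char := if c == '\r' then '\n' else c

-- segments of cs split at delimiters (always nonempty; last element = trailing remainder)
def pvSplitD : List Char → List (List Char)
  | [] => [[]]
  | c :: t => if pvIsDelim c then [] :: pvSplitD t else (pvSplitD t).modifyHead (c :: ·)

-- the kind of each delimiter, in order
def pvDflags (cs : List Char) : List Bool := (cs.filter pvIsDelim).map (· == '\r')

-- reference recursion: pending = chars accumulated since the last delimiter
def pvGo : List Char → List Char → Bool → (List (List Char × Bool)) × List Char × Bool
  | pending, [], flag => ([], pending, flag)
  | pending, c :: cs, flag =>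
    if pvIsDelim c then
      let r := pvGo [] cs (c == '\r')
      ((pending, flag || (c == '\r')) :: r.1, r.2)
    else pvGo (pending ++ [c]) cs flag

-- structural form of B's zip-fold
def pvZipAsm : List String → List Bool → Bool → (List (String × Bool)) × Bool
  | _, [], flag => ([], flag)
  | [], _ :: _, flag => ([], flag)
  | s :: segs, d :: ds, flag =>
    let r := pvZipAsm segs ds d
    ((s, flag || d) :: r.1, r.2)

theorem pvSplitD_exists_cons (cs : List Char) : ∃ s rest, pvSplitD cs = s :: rest := by
  induction cs with
  | nil => exact ⟨[], [], rfl⟩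
  | cons c t ih =>
    obtain ⟨s, rest, h⟩ := ih
    by_cases hd : pvIsDelim c
    · exact ⟨[], pvSplitD t, by simp [pvSplitD, hd]⟩
    · exact ⟨c :: s, rest, by simp [pvSplitD, hd, h]⟩

theorem pv_replace_go (l : List Char) (fuel : Nat) (acc : List Char) (h : l.length ≤ fuel) :
    PySem.Chars.replace.go ['\r'] ['\n'] fuel l acc = acc.reverse ++ l.map pvNorm := by
  induction l generalizing fuel acc with
  | nil => cases fuel <;> simp [PySem.Chars.replace.go]
  | cons c t ih =>
    cases fuel with
    | zero => simp at h
    | succ f =>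
      have hf : t.length ≤ f := by simpa using h
      by_cases hc : c = '\r'
      · have := ih f ('\n' :: acc) hf
        simp [PySem.Chars.replace.go, List.isPrefixOf, hc, this, pvNorm]
      · have := ih f (c :: acc) hf
        have hc' : ¬ ('\r' = c) := fun h' => hc h'.symm
        simp [PySem.Chars.replace.go, List.isPrefixOf, hc, hc', this, pvNorm]

theorem pv_replace (cs : List Char) :
    PySem.Chars.replace cs ['\r'] ['\n'] = cs.map pvNorm := by
  simpa using pv_replace_go cs cs.length [] (le_refl _)

theorem pv_splitOn_go (l : List Char) (fuel : Nat) (cur : List Char) (acc : List (List Char))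
    (h : l.length < fuel) :
    PySem.Chars.splitOn.go ['\n'] fuel (l.map pvNorm) cur acc
      = acc.reverse ++ (pvSplitD l).modifyHead (cur.reverse ++ ·) := by
  induction l generalizing fuel cur acc with
  | nil =>
    cases fuel with
    | zero => omega
    | succ f => simp [PySem.Chars.splitOn.go, pvSplitD]
  | cons c t ih =>
    cases fuel with
    | zero => omega
    | succ f =>
      have hf : t.length < f := by simp at h; omega
      obtain ⟨s, rest, hsr⟩ := pvSplitD_exists_cons t
      by_cases hd : pvIsDelim c
      · have hn : pvNorm c = '\n' := by
          simp [pvIsDelim] at hd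
          rcases hd with hd | hd <;> simp [pvNorm, hd]
        have := ih f [] (cur.reverse :: acc) hf
        simp [PySem.Chars.splitOn.go, hn, List.isPrefixOf, this, pvSplitD, hd, hsr]
      · have := ih f (c :: cur) acc hf
        have hn : pvNorm c = c := by
          simp [pvIsDelim] at hd
          simp [pvNorm, hd.2]
        have hne : ¬ ('\n' = c) := by
          simp [pvIsDelim] at hd
          exact fun h' => hd.1 h'.symm
        simp [PySem.Chars.splitOn.go, hn, List.isPrefixOf, hne, this, pvSplitD, hd, hsr]

theorem pv_splitOn (cs : List Char) :
    PySem.Chars.splitOn (cs.map pvNorm) ['\n'] = pvSplitD cs := by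
  obtain ⟨s, rest, hsr⟩ := pvSplitD_exists_cons cs
  have := pv_splitOn_go cs (cs.length + 1) [] [] (by omega)
  simpa [PySem.Chars.splitOn, hsr] using this

theorem pv_zipfold (segs : List String) (ds : List Bool) (flag : Bool) (acc : List (String × Bool)) :
    (segs.zip ds).foldl
      (fun (st : (List (String × Bool)) × Bool) p => (st.1 ++ [(p.1, st.2 || p.2)], p.2)) (acc, flag)
      = (acc ++ (pvZipAsm segs ds flag).1, (pvZipAsm segs ds flag).2) := by
  induction segs generalizing ds flag acc with
  | nil => cases ds <;> simp [pvZipAsm]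
  | cons s segs ih =>
    cases ds with
    | nil => simp [pvZipAsm]
    | cons d ds => simp [pvZipAsm, ih ds d]

theorem pv_go_asm (cs : List Char) (pending : List Char) (flag : Bool) :
    ((pvGo pending cs flag).1.map (fun p => (String.ofList p.1, p.2)), (pvGo pending cs flag).2.2)
        = pvZipAsm (((pvSplitD cs).modifyHead (pending ++ ·)).map String.ofList) (pvDflags cs) flag
    ∧ ((pvSplitD cs).modifyHead (pending ++ ·)).getLast? = some (pvGo pending cs flag).2.1 := by
  induction cs generalizing pending flag with
  | nil => simp [pvGo, pvSplitD, pvDflags, pvZipAsm]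
  | cons c t ih =>
    obtain ⟨s, rest, hsr⟩ := pvSplitD_exists_cons t
    by_cases hd : pvIsDelim c
    · obtain ⟨ih1, ih2⟩ := ih [] (c == '\r')
      rw [hsr] at ih1 ih2
      simp at ih1 ih2
      constructor
      · simp [pvGo, pvSplitD, pvDflags, pvZipAsm, hd, hsr, Prod.ext_iff] at ih1 ⊢
        exact ih1
      · simp [pvGo, pvSplitD, hd, hsr] at ih2 ⊢
        exact ih2
    · obtain ⟨ih1, ih2⟩ := ih (pending ++ [c]) flag
      rw [hsr] at ih1 ih2
      constructor
      · simp [pvGo, pvSplitD, pvDflags, hd, hsr] at ih1 ⊢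
        simpa using ih1
      · simp [pvGo, pvSplitD, hd, hsr] at ih2 ⊢
        simpa using ih2

theorem pv_foldA (buffer : String) (cs pending : List Char) (s : Nat) (acc : List (String × Bool)) (flag : Bool)
    (hdrop : buffer.toList.drop s = pending ++ cs) (hs : s ≤ buffer.toList.length) :
    (PySem.List.enumerate cs ((s + pending.length : Nat) : Int)).foldl
      (fun (st : (List (String × Bool)) × Int × Bool) ic =>
        if !(ic.2 == '\n' || ic.2 == '\r') then st
        else
          (st.1 ++ [(PySem.Str.slice buffer (some st.2.1) (some ic.1), st.2.2 || (ic.2 == '\r'))],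
            ic.1 + 1, ic.2 == '\r'))
      (acc, ((s : Nat) : Int), flag)
    = (acc ++ (pvGo pending cs flag).1.map (fun p => (String.ofList p.1, p.2)),
        ((buffer.toList.length - (pvGo pending cs flag).2.1.length : Nat) : Int),
        (pvGo pending cs flag).2.2)
    ∧ buffer.toList.drop (buffer.toList.length - (pvGo pending cs flag).2.1.length)
        = (pvGo pending cs flag).2.1 := by
  induction cs generalizing pending s acc flag with
  | nil =>
    have h1 := congrArg List.length hdrop
    rw [List.length_drop, List.length_append, List.length_nil] at h1
    have hse : s = buffer.toList.length - pending.length := by omega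
    constructor
    · have hbl : buffer.toList.length = buffer.length := by simp
      simp [pvGo, PySem.List.enumerate]
      omega
    · simp only [pvGo, ← hse]
      simpa using hdrop
  | cons c t ih =>
    have h1 := congrArg List.length hdrop
    rw [List.length_drop, List.length_append, List.length_cons] at h1
    have hlen : buffer.toList.length - s = pending.length + (t.length + 1) := by omega
    by_cases hd : pvIsDelim c
    · -- c is a delimiter: flush pending, restart at s + pending.length + 1
      have hdrop' : buffer.toList.drop (s + pending.length + 1) = t := by
        have : buffer.toList.drop (s + pending.length + 1)
            = (buffer.toList.drop s).drop (pending.length + 1) := by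
          rw [List.drop_drop]; ring_nf
        rw [this, hdrop]
        simp
      have hs' : s + pending.length + 1 ≤ buffer.toList.length := by omega
      obtain ⟨ih1, ih2⟩ := ih [] (s + pending.length + 1) (acc ++ [(String.ofList pending, flag || (c == '\r'))]) (c == '\r') (by simpa using hdrop') hs'
      have hslice : PySem.Str.slice buffer (some ((s : Nat) : Int)) (some ((s + pending.length : Nat) : Int)) = String.ofList pending := by
        unfold PySem.Str.slice
        rw [PySem.Chars.slice_eq_listSlice, PySem.List.slice_natCast]
        congr 1
        have : s + pending.length - s = pending.length := by omega
        rw [this, hdrop]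
        simp
      have hcast : ((s + pending.length : Nat) : Int) + 1 = ((s + pending.length + 1 : Nat) : Int) := by
        push_cast; ring
      simp only [List.length_nil, Nat.add_zero] at ih1
      constructor
      · rw [PySem.List.enumerate_cons, List.foldl_cons]
        have hcond : (!(c == '\n' || c == '\r')) = false := by
          simp [pvIsDelim] at hd
          rcases hd with hd | hd <;> simp [hd]
        simp only [hcond, Bool.false_eq_true, if_false, hslice]
        rw [hcast, ih1]
        simp [pvGo, hd]
      · simpa [pvGo, hd] using ih2
    · -- c is not a delimiter: absorb it into pending
      have hdrop' : buffer.toList.drop s = (pending ++ [c]) ++ t := by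
        simpa using hdrop
      obtain ⟨ih1, ih2⟩ := ih (pending ++ [c]) s acc flag hdrop' hs
      have hcast : ((s + pending.length : Nat) : Int) + 1 = ((s + (pending ++ [c]).length : Nat) : Int) := by
        push_cast; simp; ring
      constructor
      · rw [PySem.List.enumerate_cons, List.foldl_cons]
        have hcond : (!(c == '\n' || c == '\r')) = true := by
          simp [pvIsDelim] at hd
          simp [hd.1, hd.2]
        simp only [hcond, if_true]
        rw [hcast, ih1]
        simp [pvGo, hd]
      · simpa [pvGo, hd] using ih2

-- ===== VERDICT (by name: the statement is the Claim_ definition above) =====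
theorem split_stream_buffer_py_spec : Claim_equal_split_stream_buffer_py := by
  intro buffer flag _
  unfold Spec_split_stream_buffer_py split_stream_buffer_py split_stream_buffer_py_alt
  dsimp only
  obtain ⟨hfold, hdropr⟩ := pv_foldA buffer buffer.toList [] 0 [] flag (by simp) (by simp)
  simp only [List.length_nil, Nat.add_zero, Nat.cast_zero] at hfold
  obtain ⟨s0, rest0, hsr0⟩ := pvSplitD_exists_cons buffer.toList
  have hmod : (pvSplitD buffer.toList).modifyHead (([] : List Char) ++ ·) = pvSplitD buffer.toList := by
    rw [hsr0]; simp
  obtain ⟨hasm, hlast⟩ := pv_go_asm buffer.toList [] flag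
  rw [hmod] at hasm hlast
  have hsegs : (PySem.Str.split? (PySem.Str.replace buffer "\r" "\n") "\n").getD []
      = (pvSplitD buffer.toList).map String.ofList := by
    have hrl : ("\r" : String).toList = ['\r'] := by decide
    have hnl : ("\n" : String).toList = ['\n'] := by decide
    unfold PySem.Str.split? PySem.Str.replace
    rw [hrl, hnl, pv_replace]
    simp [PySem.Chars.split?, pv_splitOn]
  have hflags : (buffer.toList.filter (fun c => c == '\n' || c == '\r')).map (fun c => c == '\r')
      = pvDflags buffer.toList := by
    simp only [pvDflags]; rfl
  rw [hsegs, hflags]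
  rw [pv_zipfold ((pvSplitD buffer.toList).map String.ofList) (pvDflags buffer.toList) flag []]
  rw [← hasm]
  rw [hfold]
  have hlastm : ((pvSplitD buffer.toList).map String.ofList).getLast?.getD ""
      = String.ofList (pvGo [] buffer.toList flag).2.1 := by
    rw [List.getLast?_map, hlast]
    rfl
  rw [hlastm]
  have hrem : PySem.Str.slice buffer (some ((buffer.toList.length - (pvGo [] buffer.toList flag).2.1.length : Nat) : Int)) none
      = String.ofList (pvGo [] buffer.toList flag).2.1 := by
    unfold PySem.Str.slice
    rw [PySem.Chars.slice_eq_listSlice, PySem.List.slice_from _ (by positivity)]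
    rw [Int.toNat_natCast, hdropr]
  rw [hrem]
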